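-- pv_equiv track=rewrite | github.com/dohyeongkim97/programmers | 프로그래머스/1/12917. 문자열 내림차순으로 배치하기/문자열 내림차순으로 배치하기.py | solution
-- ===== SOURCE A (Python) =====
-- def solution(s):
--     answer = ''
--     large = []
--     small = []
--     for alpha in s:
--         if alpha in 'ABCDEFGHIJKLMNOPQRSTUVWXYZ':
--             large.append(alpha)
--
--         else:
--             small.append(alpha)
--
--     large = ''.join(sorted(large, reverse=True))
--     small = ''.join(sorted(small, reverse=True))
--     answer = small+large
--
--     return answer
-- ===== SOURCE B (Python) =====
-- def solution(s):
--     counts = {}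
--     for ch in s:
--         counts[ch] = counts.get(ch, 0) + 1
--     parts = []
--     for code in range(126, 90, -1):
--         parts.append(chr(code) * counts.get(chr(code), 0))
--     for code in range(64, -1, -1):
--         parts.append(chr(code) * counts.get(chr(code), 0))
--     for code in range(90, 64, -1):
--         parts.append(chr(code) * counts.get(chr(code), 0))
--     return ''.join(parts)
-- ===== Notes on version B (the rewrite author's own statement) =====
-- stated objective: faster
-- what changed: B replaces the partition-then-two-reverse-sorts of A with a single counting pass (a dict of per-character counts) and then emits characters directly by descending character code (non-uppercase codes first, then uppercase), i.e. a counting sort over the bounded ASCII range instead of comparison sorting.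
import Mathlib
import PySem

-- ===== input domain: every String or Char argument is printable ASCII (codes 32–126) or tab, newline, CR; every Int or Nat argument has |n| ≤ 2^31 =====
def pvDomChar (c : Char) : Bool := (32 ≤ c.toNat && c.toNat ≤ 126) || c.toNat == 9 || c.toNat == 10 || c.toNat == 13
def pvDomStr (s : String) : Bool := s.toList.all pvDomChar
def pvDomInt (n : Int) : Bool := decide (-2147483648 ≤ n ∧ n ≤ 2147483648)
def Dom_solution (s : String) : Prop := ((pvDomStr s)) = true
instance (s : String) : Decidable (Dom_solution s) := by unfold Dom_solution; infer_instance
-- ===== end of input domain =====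

-- B replaces the two reverse sorts with a counting pass (a dict of character counts) and emits
-- characters by descending code directly: O(n) instead of O(n log n) (objective: faster).

-- ===== PORT A =====
-- 'alpha in "ABC…XYZ"' for a single character is exactly membership among the string's characters
def pvUpperChars : List Char := "ABCDEFGHIJKLMNOPQRSTUVWXYZ".toList

def solution (s : String) : String :=
  -- large = []; small = []; for alpha in s: append to large or small
  let ls := s.toList.foldl
    (fun (p : List Char × List Char) alpha =>
      if pvUpperChars.contains alpha then (p.1 ++ [alpha], p.2)
      else (p.1, p.2 ++ [alpha]))
    ([], [])
  -- large = ''.join(sorted(large, reverse=True)); small = ''.join(sorted(small, reverse=True))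
  let large := PySem.List.sorted ls.1 (fun x => x) true
  let small := PySem.List.sorted ls.2 (fun x => x) true
  -- answer = small + large  (''.join over single characters / '+' = concatenation, via String.mk)
  String.mk (small ++ large)

-- ===== PORT B =====
def solution_alt (s : String) : String :=
  -- counts = {}; for ch in s: counts[ch] = counts.get(ch, 0) + 1
  let counts : PySem.Dict Char Int :=
    s.toList.foldl (fun d ch => d.modify ch 0 (fun v => v + 1)) PySem.Dict.empty
  let parts : List (List Char) := []
  -- for code in range(126, 90, -1): parts.append(chr(code) * counts.get(chr(code), 0))
  let parts := (PySem.List.pyRange 126 90 (-1)).foldl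
      (fun acc code =>
        acc ++ [List.replicate (counts.getD (Char.ofNat code.toNat) 0).toNat (Char.ofNat code.toNat)])
      parts
  -- for code in range(64, -1, -1): parts.append(chr(code) * counts.get(chr(code), 0))
  let parts := (PySem.List.pyRange 64 (-1) (-1)).foldl
      (fun acc code =>
        acc ++ [List.replicate (counts.getD (Char.ofNat code.toNat) 0).toNat (Char.ofNat code.toNat)])
      parts
  -- for code in range(90, 64, -1): parts.append(chr(code) * counts.get(chr(code), 0))
  let parts := (PySem.List.pyRange 90 64 (-1)).foldl
      (fun acc code =>
        acc ++ [List.replicate (counts.getD (Char.ofNat code.toNat) 0).toNat (Char.ofNat code.toNat)])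
      parts
  -- return ''.join(parts)
  String.mk parts.flatten

-- ===== PRECONDITION & SPEC =====
def Spec_solution (s : String) (out : String) : Prop := out = solution_alt s
instance (s : String) (out : String) : Decidable (Spec_solution s out) := by unfold Spec_solution; infer_instance

-- ===== CLAIM (what is proved, stated in full; the proofs are below) =====
def Claim_equal_solution : Prop := ∀ (s : String), Dom_solution s → Spec_solution s (solution s)

-- ===== LEMMAS AND PROOFS =====

theorem pv_part (l : List Char) (a b : List Char) :
    l.foldl
      (fun (p : List Char × List Char) alpha =>
        if pvUpperChars.contains alpha then (p.1 ++ [alpha], p.2)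
        else (p.1, p.2 ++ [alpha])) (a, b)
    = (a ++ l.filter (fun c => pvUpperChars.contains c),
       b ++ l.filter (fun c => !pvUpperChars.contains c)) := by
  induction l generalizing a b with
  | nil => simp
  | cons x t ih =>
    rw [List.foldl_cons]
    by_cases h : pvUpperChars.contains x = true
    · rw [if_pos h, ih, List.filter_cons, List.filter_cons]
      have hx : x ∈ pvUpperChars := List.contains_iff_mem.mp h
      simp [hx, h]
    · rw [if_neg h, ih, List.filter_cons, List.filter_cons]
      have hx : x ∉ pvUpperChars := fun hm => h (List.contains_iff_mem.mpr hm)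
      simp [hx, h]

theorem pv_upper_iff (c : Char) :
    pvUpperChars.contains c = true ↔ 65 ≤ c.toNat ∧ c.toNat ≤ 90 := by
  rw [List.contains_iff_mem]
  constructor
  · intro h
    have hall : pvUpperChars.all (fun d => decide (65 ≤ d.toNat ∧ d.toNat ≤ 90)) = true := by decide
    exact of_decide_eq_true (List.all_eq_true.mp hall c h)
  · rintro ⟨h1, h2⟩
    rw [(Char.ofNat_toNat c).symm]
    interval_cases h : c.toNat <;> decide

theorem pv_chr_toNat (k : Int) (h0 : 0 ≤ k) (h1 : k ≤ 126) :
    (Char.ofNat k.toNat).toNat = k.toNat := by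
  rw [Char.toNat_ofNat, if_pos]
  left; omega

theorem pv_key_inj : Function.Injective (fun c : Char => (1114112 : Int) - (c.toNat : Int)) := by
  intro a b h
  simp only [sub_right_inj, Int.natCast_inj] at h
  exact Char.ext (UInt32.toNat_inj.mp h)

theorem pv_count_flat (m : List Char) (c : Char) :
    ∀ ks : List Int, ks.Nodup → (∀ k ∈ ks, 0 ≤ k ∧ k ≤ 126) →
      (ks.flatMap (fun k =>
          List.replicate (m.count (Char.ofNat k.toNat)) (Char.ofNat k.toNat))).count c
      = if ((c.toNat : Int) ∈ ks) then m.count c else 0 := by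
  intro ks
  induction ks with
  | nil => simp
  | cons k t ih =>
    intro hnd hval
    obtain ⟨hk1, hk2⟩ := hval k (by simp)
    have hnd' := List.nodup_cons.mp hnd
    rw [List.flatMap_cons, List.count_append, List.count_replicate,
        ih hnd'.2 (fun x hx => hval x (by simp [hx]))]
    by_cases hk : k = (c.toNat : Int)
    · have hchr : Char.ofNat k.toNat = c := by
        rw [hk, Int.toNat_natCast, Char.ofNat_toNat]
      have hnt : (c.toNat : Int) ∉ t := by rw [← hk]; exact hnd'.1
      simp [hchr, hk, hnt]
    · have hchr : (Char.ofNat k.toNat == c) = false := by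
        apply beq_eq_false_iff_ne.mpr
        intro he
        apply hk
        have := pv_chr_toNat k hk1 hk2
        have h2 : k.toNat = c.toNat := by rw [← this, he]
        omega
      rw [hchr]
      have hiff : ((c.toNat : Int) ∈ k :: t) ↔ ((c.toNat : Int) ∈ t) := by
        simp [List.mem_cons, Ne.symm hk]
      simp [hiff]

theorem pv_flat_sorted (ks : List Int) (m : List Char)
    (hpw : ks.Pairwise (· > ·))
    (hval : ∀ k ∈ ks, 0 ≤ k ∧ k ≤ 126)
    (hmem : ∀ c ∈ m, (c.toNat : Int) ∈ ks) :
    ks.flatMap (fun k =>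
        List.replicate (m.count (Char.ofNat k.toNat)) (Char.ofNat k.toNat))
    = PySem.List.sorted m (fun x => x) true := by
  have hnd : ks.Nodup := hpw.imp (fun h => ne_of_gt h)
  apply PySem.List.eq_of_perm_of_pairwise_le_of_injective
      (fun c : Char => (1114112 : Int) - (c.toNat : Int)) pv_key_inj
  · -- permutation
    have h1 : (ks.flatMap (fun k =>
        List.replicate (m.count (Char.ofNat k.toNat)) (Char.ofNat k.toNat))).Perm m := by
      rw [List.perm_iff_count]
      intro c
      rw [pv_count_flat m c ks hnd hval]
      by_cases hc : (c.toNat : Int) ∈ ks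
      · simp [hc]
      · rw [if_neg hc]
        exact (List.count_eq_zero.mpr (fun hm => hc (hmem c hm))).symm
    exact h1.trans (PySem.List.sorted_perm m (fun x => x) true).symm
  · -- pairwise of the flatMap, descending codes
    rw [List.flatMap_def, List.pairwise_flatten]
    refine ⟨?_, ?_⟩
    · intro l hl
      obtain ⟨k, _, rfl⟩ := List.mem_map.mp hl
      rw [List.pairwise_replicate]
      right; omega
    · rw [List.pairwise_map]
      refine List.Pairwise.imp_of_mem ?_ hpw
      intro k1 k2 hm1 hm2 hgt x hx y hy
      obtain ⟨h11, h12⟩ := hval k1 hm1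
      obtain ⟨h21, h22⟩ := hval k2 hm2
      rw [List.eq_of_mem_replicate hx, List.eq_of_mem_replicate hy]
      have e1 := pv_chr_toNat k1 h11 h12
      have e2 := pv_chr_toNat k2 h21 h22
      omega
  · -- pairwise of sorted m (reverse)
    refine (PySem.List.sorted_pairwise_rev m (fun x => x)).imp ?_
    intro a b h
    simp only [] at h ⊢
    have : b.toNat ≤ a.toNat := UInt32.le_iff_toNat_le.mp (Char.le_def.mp h)
    omega

theorem pv_c1_pw : (PySem.List.pyRange 126 90 (-1) ++ PySem.List.pyRange 64 (-1) (-1)).Pairwise (· > ·) := by decide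
theorem pv_c3_pw : (PySem.List.pyRange 90 64 (-1)).Pairwise (· > ·) := by decide
theorem pv_c1_val : ∀ k ∈ PySem.List.pyRange 126 90 (-1) ++ PySem.List.pyRange 64 (-1) (-1), 0 ≤ k ∧ k ≤ 126 := by decide
theorem pv_c3_val : ∀ k ∈ PySem.List.pyRange 90 64 (-1), 0 ≤ k ∧ k ≤ 126 := by decide

theorem pv_mem_small (n : Nat)
    (hd : n = 9 ∨ n = 10 ∨ n = 13 ∨ (32 ≤ n ∧ n ≤ 126)) (hn : ¬(65 ≤ n ∧ n ≤ 90)) :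
    (n : Int) ∈ PySem.List.pyRange 126 90 (-1) ++ PySem.List.pyRange 64 (-1) (-1) := by
  have he : PySem.List.pyRange 126 90 (-1) ++ PySem.List.pyRange 64 (-1) (-1) =
      [126, 125, 124, 123, 122, 121, 120, 119, 118, 117, 116, 115, 114, 113, 112, 111, 110, 109, 108, 107, 106, 105, 104, 103, 102, 101, 100, 99, 98, 97, 96, 95, 94, 93, 92, 91, 64, 63, 62, 61, 60, 59, 58, 57, 56, 55, 54, 53, 52, 51, 50, 49, 48, 47, 46, 45, 44, 43, 42, 41, 40, 39, 38, 37, 36, 35, 34, 33, 32, 31, 30, 29, 28, 27, 26, 25, 24, 23, 22, 21, 20, 19, 18, 17, 16, 15, 14, 13, 12, 11, 10, 9, 8, 7, 6, 5, 4, 3, 2, 1, 0] := by decide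
  rw [he]
  simp only [List.mem_cons, List.not_mem_nil, or_false]
  omega

theorem pv_mem_up (n : Nat) (h1 : 65 ≤ n) (h2 : n ≤ 90) :
    (n : Int) ∈ PySem.List.pyRange 90 64 (-1) := by
  have he : PySem.List.pyRange 90 64 (-1) =
      [90, 89, 88, 87, 86, 85, 84, 83, 82, 81, 80, 79, 78, 77, 76, 75, 74, 73, 72, 71, 70, 69, 68, 67, 66, 65] := by decide
  rw [he]
  simp only [List.mem_cons, List.not_mem_nil, or_false]
  omega

-- ===== VERDICT (by name: the statement is the Claim_ definition above) =====
theorem solution_spec : Claim_equal_solution := by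
  unfold Claim_equal_solution
  intro s hdom
  unfold Spec_solution solution solution_alt
  simp only [pv_part, List.nil_append]
  have hcnt : ∀ ch : Char,
      (s.toList.foldl (fun d ch => d.modify ch 0 (fun v => v + 1)) PySem.Dict.empty).getD ch 0
      = (s.toList.count ch : Int) := by
    intro ch
    rw [PySem.Dict.getD_foldl_modify_add_one]
    simp [PySem.Dict.getD, PySem.Dict.get?, PySem.Dict.empty]
  simp only [hcnt, Int.toNat_natCast,
    PySem.List.foldl_append_singleton_eq_map, List.nil_append,
    List.flatten_append, ← List.flatMap_def]
  rw [← List.flatMap_append]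
  have hdc : ∀ c ∈ s.toList, pvDomChar c = true := by
    have : pvDomStr s = true := hdom
    exact List.all_eq_true.mp this
  have hsmall : List.flatMap
        (fun k => List.replicate (List.count (Char.ofNat k.toNat) s.toList) (Char.ofNat k.toNat))
        (PySem.List.pyRange 126 90 (-1) ++ PySem.List.pyRange 64 (-1) (-1))
      = PySem.List.sorted (List.filter (fun c => !pvUpperChars.contains c) s.toList) (fun x => x) true := by
    rw [List.flatMap_congr (g := fun k => List.replicate
        ((List.filter (fun c => !pvUpperChars.contains c) s.toList).count (Char.ofNat k.toNat))
        (Char.ofNat k.toNat))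
        (fun k hk => by
          have hcf : (pvUpperChars.contains (Char.ofNat k.toNat)) = false := by
            revert hk; revert k; decide
          exact congrArg (fun n => List.replicate n (Char.ofNat k.toNat))
            (List.count_filter (p := fun c => !pvUpperChars.contains c)
              (by simp only [Bool.not_eq_true']; exact hcf)).symm)]
    exact pv_flat_sorted _ _ pv_c1_pw pv_c1_val (fun c hc => by
      obtain ⟨hcm, hcp⟩ := List.mem_filter.mp hc
      have hb := hdc c hcm
      simp [pvDomChar] at hb
      have hno : ¬(65 ≤ c.toNat ∧ c.toNat ≤ 90) := by
        intro hby
        have hfalse : pvUpperChars.contains c = false := by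
          cases hcb : pvUpperChars.contains c with
          | false => rfl
          | true => rw [hcb] at hcp; cases hcp
        rw [(pv_upper_iff c).mpr hby] at hfalse
        cases hfalse
      apply pv_mem_small c.toNat ?_ hno
      omega)
  have hup : List.flatMap
        (fun k => List.replicate (List.count (Char.ofNat k.toNat) s.toList) (Char.ofNat k.toNat))
        (PySem.List.pyRange 90 64 (-1))
      = PySem.List.sorted (List.filter (fun c => pvUpperChars.contains c) s.toList) (fun x => x) true := by
    rw [List.flatMap_congr (g := fun k => List.replicate
        ((List.filter (fun c => pvUpperChars.contains c) s.toList).count (Char.ofNat k.toNat))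
        (Char.ofNat k.toNat))
        (fun k hk => by
          have hct : (pvUpperChars.contains (Char.ofNat k.toNat)) = true := by
            revert hk; revert k; decide
          exact congrArg (fun n => List.replicate n (Char.ofNat k.toNat))
            (List.count_filter (p := fun c => pvUpperChars.contains c) hct).symm)]
    exact pv_flat_sorted _ _ pv_c3_pw pv_c3_val (fun c hc => by
      obtain ⟨hcm, hcp⟩ := List.mem_filter.mp hc
      have hby := (pv_upper_iff c).mp hcp
      exact pv_mem_up c.toNat hby.1 hby.2)
  rw [hsmall, hup]
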